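-- pv_equiv track=rewrite | github.com/pypi-data/pypi-mirror-396 | packages/slidescore-sdk/slidescore_sdk-1.5.0-py3-none-any.whl/slidescore/lib/image_utils.py | get_max_vals
-- ===== SOURCE A (Python) =====
-- def get_max_vals(lookup_table):
--     """Calculates the width and height of the lookup table and the max value present."""
--     max_y = 0
--     max_x = 0
--     max_val = 0
--
--     for y in lookup_table:
--         max_y = max(max_y, y)
--         for x in lookup_table[y]:
--             max_x = max(max_x, x)
--             max_val = max(max_val, lookup_table[y][x])
--     return max_x, max_y, max_val
-- ===== SOURCE B (Python) =====
-- def get_max_vals(lookup_table):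
--     """Calculates the width and height of the lookup table and the max value present."""
--     ys = sorted([0] + list(lookup_table))
--     xs = sorted([0] + [x for row in lookup_table.values() for x in row])
--     vs = sorted([0] + [v for row in lookup_table.values() for v in row.values()])
--     return xs[-1], ys[-1], vs[-1]
-- ===== Notes on version B (the rewrite author's own statement) =====
-- stated objective: alternative
-- what changed: Instead of a nested loop maintaining three running-max accumulators, B collects the outer keys, flattened inner keys and flattened inner values into 0-seeded lists, sorts each, and takes the last element of each sorted list.
import Mathlib
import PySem

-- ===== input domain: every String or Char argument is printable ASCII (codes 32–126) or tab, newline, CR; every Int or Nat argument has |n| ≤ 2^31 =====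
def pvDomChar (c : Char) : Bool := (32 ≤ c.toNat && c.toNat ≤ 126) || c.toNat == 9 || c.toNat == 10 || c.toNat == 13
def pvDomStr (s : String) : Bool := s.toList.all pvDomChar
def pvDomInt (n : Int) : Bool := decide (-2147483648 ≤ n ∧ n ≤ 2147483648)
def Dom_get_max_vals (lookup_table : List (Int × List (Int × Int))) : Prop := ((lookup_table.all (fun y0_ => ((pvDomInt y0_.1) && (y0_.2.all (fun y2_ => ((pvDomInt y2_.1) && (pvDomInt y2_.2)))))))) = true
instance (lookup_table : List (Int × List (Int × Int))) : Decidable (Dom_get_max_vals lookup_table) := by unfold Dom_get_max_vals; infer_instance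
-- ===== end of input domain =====

-- B replaces A's nested running-max loop by a sort-based scheme: it collects outer keys,
-- flattened inner keys and flattened inner values into 0-seeded lists, sorts each, and
-- takes the last element (objective: alternative; not faster).

-- ===== PORT A =====
-- One pass over the dict: state is (max_x, max_y, max_val), updated exactly as A does.
def get_max_vals (lookup_table : List (Int × List (Int × Int))) : Int × Int × Int :=
  lookup_table.foldl
    (fun (acc : Int × Int × Int) yrow =>
      let max_y := max acc.2.1 yrow.1
      yrow.2.foldl
        (fun (p : Int × Int × Int) xv => (max p.1 xv.1, p.2.1, max p.2.2 xv.2))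
        (acc.1, max_y, acc.2.2))
    (0, 0, 0)

-- ===== PORT B =====
-- sorted([0] + l)[-1]; the list is nonempty (0-seeded), so the .getD 0 is a totality guard only
def lastSortedSeed0 (l : List Int) : Int :=
  ((PySem.List.sorted (0 :: l) (fun x => x) false).getLast?).getD 0

def get_max_vals_alt (lookup_table : List (Int × List (Int × Int))) : Int × Int × Int :=
  let ys := lastSortedSeed0 (lookup_table.map (fun p => p.1))
  let xs := lastSortedSeed0 (lookup_table.flatMap (fun p => p.2.map (fun q => q.1)))
  let vs := lastSortedSeed0 (lookup_table.flatMap (fun p => p.2.map (fun q => q.2)))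
  (xs, ys, vs)

-- ===== PRECONDITION & SPEC =====
def Spec_get_max_vals (lookup_table : List (Int × List (Int × Int))) (out : Int × Int × Int) : Prop := out = get_max_vals_alt lookup_table
instance (lookup_table : List (Int × List (Int × Int))) (out : Int × Int × Int) : Decidable (Spec_get_max_vals lookup_table out) := by unfold Spec_get_max_vals; infer_instance

-- ===== CLAIM (what is proved, stated in full; the proofs are below) =====
def Claim_equal_get_max_vals : Prop := ∀ (lookup_table : List (Int × List (Int × Int))), Dom_get_max_vals lookup_table → Spec_get_max_vals lookup_table (get_max_vals lookup_table)

-- ===== LEMMAS AND PROOFS =====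

-- the last element of an ascending-sorted list bounds every member
theorem mem_le_getLast (s : List Int) : s.Pairwise (fun a b : Int => a ≤ b) →
    ∀ (hne : s ≠ []) (y : Int), y ∈ s → y ≤ s.getLast hne := by
  induction s with
  | nil => intro _ hne; exact absurd rfl hne
  | cons h t ih =>
    intro hp hne y hy
    rcases List.pairwise_cons.mp hp with ⟨hb, ht⟩
    cases t with
    | nil =>
      rcases List.mem_singleton.mp hy with rfl
      simp [List.getLast]
    | cons a u =>
      have hlast := ih ht (by simp)
      have hGL : (h :: a :: u).getLast hne = (a :: u).getLast (by simp) := by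
        simp [List.getLast]
      rcases List.mem_cons.mp hy with rfl | hmem
      · rw [hGL]; exact le_trans (hb a (by simp)) (hlast a (by simp))
      · rw [hGL]; exact hlast y hmem

theorem lastSortedSeed0_eq_foldl_max (l : List Int) :
    lastSortedSeed0 l = l.foldl max 0 := by
  unfold lastSortedSeed0
  set s := PySem.List.sorted (0 :: l) (fun x => x) false with hs
  have hne : s ≠ [] := by
    intro h
    have := (PySem.List.sorted_eq_nil_iff (xs := 0 :: l) (key := fun x => x) (rev := false)).mp (hs ▸ h)
    simp at this
  have hperm : s.Perm (0 :: l) := hs ▸ PySem.List.sorted_perm _ _ _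
  have hlast_mem : s.getLast hne ∈ (0 :: l) := hperm.mem_iff.mp (List.getLast_mem hne)
  have hp : s.Pairwise (fun a b : Int => a ≤ b) := hs ▸ PySem.List.sorted_pairwise _ _
  have hboundM := PySem.List.le_foldl_max l 0
  have hMmem : l.foldl max 0 ∈ (0 :: l) := by
    rcases PySem.List.foldl_max_mem l 0 with h | h
    · simp [h]
    · exact List.mem_cons_of_mem _ h
  have h1 : s.getLast hne ≤ l.foldl max 0 := by
    rcases List.mem_cons.mp hlast_mem with heq | hmem
    · rw [heq]; exact hboundM.1
    · exact hboundM.2 _ hmem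
  have h2 : l.foldl max 0 ≤ s.getLast hne :=
    mem_le_getLast s hp hne _ (hperm.mem_iff.mpr hMmem)
  rw [List.getLast?_eq_some_getLast hne]
  simpa using le_antisymm h1 h2

theorem inner_fold (row : List (Int × Int)) : ∀ (mx k mv : Int),
    row.foldl (fun (p : Int × Int × Int) xv => (max p.1 xv.1, p.2.1, max p.2.2 xv.2)) (mx, k, mv)
      = ((row.map (fun q => q.1)).foldl max mx, k, (row.map (fun q => q.2)).foldl max mv) := by
  induction row with
  | nil => intro mx k mv; rfl
  | cons h t ih => intro mx k mv; simp only [List.foldl_cons, List.map_cons]; exact ih _ _ _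

theorem outer_fold (lt : List (Int × List (Int × Int))) : ∀ (mx my mv : Int),
    lt.foldl
      (fun (acc : Int × Int × Int) yrow =>
        let max_y := max acc.2.1 yrow.1
        yrow.2.foldl
          (fun (p : Int × Int × Int) xv => (max p.1 xv.1, p.2.1, max p.2.2 xv.2))
          (acc.1, max_y, acc.2.2))
      (mx, my, mv)
      = ((lt.flatMap (fun p => p.2.map (fun q => q.1))).foldl max mx,
         (lt.map (fun p => p.1)).foldl max my,
         (lt.flatMap (fun p => p.2.map (fun q => q.2))).foldl max mv) := by
  induction lt with
  | nil => intro mx my mv; rfl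
  | cons h t ih =>
    intro mx my mv
    simp only [List.foldl_cons, List.flatMap_cons, List.map_cons, List.foldl_append]
    rw [inner_fold, ih]

-- ===== VERDICT (by name: the statement is the Claim_ definition above) =====
theorem get_max_vals_spec : Claim_equal_get_max_vals := by
  intro lt _
  show get_max_vals lt = get_max_vals_alt lt
  simp only [get_max_vals, get_max_vals_alt, outer_fold, lastSortedSeed0_eq_foldl_max]
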